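-- pv_equiv track=rewrite | github.com/openai/gym | gym/vector/batched_vector_env.py | n_consecutive
-- ===== SOURCE A (Python) =====
-- from typing import (Any, Callable, Dict, Iterable, List, Optional, Sequence,
--                     Tuple, TypeVar, Union)
--
-- T = TypeVar("T")
--
-- def n_consecutive(items: Iterable[T], n: int=2, yield_last_batch=True) -> Iterable[Tuple[T, ...]]:
--     """Collect data into chunks of up to `n` elements.
--
--     When `yield_last_batch` is True, the final chunk (which might have fewer
--     than `n` items) will also be yielded.
--
--     >>> list(n_consecutive("ABCDEFG", 3))
--     [["A", "B", "C"], ["D", "E", "F"], ["G"]]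
--     """
--     values: List[T] = []
--     for item in items:
--         values.append(item)
--         if len(values) == n:
--             yield tuple(values)
--             values.clear()
--     if values and yield_last_batch:
--         yield tuple(values)
-- ===== SOURCE B (Python) =====
-- def n_consecutive(items, n=2, yield_last_batch=True):
--     """Collect data into chunks of up to `n` elements, by block-wise slicing."""
--     seq = list(items)
--     while seq:
--         batch, seq = tuple(seq[:n]), seq[n:]
--         if len(batch) == n or yield_last_batch:
--             yield batch
-- ===== Notes on version B (the rewrite author's own statement) =====
-- stated objective: idiomatic
-- what changed: Replaces A's element-by-element accumulator (append, flush when full, clear) with block-wise slicing: materialize the input once and repeatedly split off the first n elements as a batch.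
-- outside the precondition, e.g. on n_consecutive(['a'], 0, True): A returns [('a',)], B does not finish within the time limit; on n_consecutive(['a', 'b'], -1, True): A returns [('a', 'b')], B does not finish within the time limit
import Mathlib
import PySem

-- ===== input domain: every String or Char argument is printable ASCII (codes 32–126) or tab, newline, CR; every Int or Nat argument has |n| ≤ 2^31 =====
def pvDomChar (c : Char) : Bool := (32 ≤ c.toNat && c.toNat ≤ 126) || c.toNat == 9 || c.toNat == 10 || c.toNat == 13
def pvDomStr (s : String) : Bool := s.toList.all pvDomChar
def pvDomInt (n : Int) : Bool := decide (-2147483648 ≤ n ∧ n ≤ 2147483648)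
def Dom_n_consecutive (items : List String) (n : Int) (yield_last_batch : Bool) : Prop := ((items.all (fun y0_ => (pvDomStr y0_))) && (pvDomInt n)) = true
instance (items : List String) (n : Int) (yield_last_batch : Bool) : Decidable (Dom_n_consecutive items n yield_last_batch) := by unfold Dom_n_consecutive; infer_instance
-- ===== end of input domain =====

-- B replaces A's append/flush accumulator by block-wise slicing (split off the first n
-- elements each round); equivalence is proved for chunk size n ≥ 1 (return values only).

-- ===== PORT A =====
-- one loop iteration of A: append the item, flush when the buffer reaches length n
def nconsStep (n : Int) (st : List (List String) × List String) (item : String) :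
    List (List String) × List String :=
  let values := st.2 ++ [item]
  if (values.length : Int) = n then (st.1 ++ [values], []) else (st.1, values)

def n_consecutive (items : List String) (n : Int) (yield_last_batch : Bool) : List (List String) :=
  let s := items.foldl (nconsStep n) ([], [])
  if !s.2.isEmpty && yield_last_batch then s.1 ++ [s.2] else s.1

-- ===== PORT B =====
-- while seq: batch, seq = seq[:n], seq[n:]; yield batch if len(batch)==n or yield_last_batch
-- (the `rest.length < seq.length` test is only a totality guard: the Python loop
--  diverges exactly when it fails, i.e. for n ≤ 0, which Pre_ excludes)
def nconsAltLoop (n : Int) (yield_last_batch : Bool) (seq : List String) : List (List String) :=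
  if seq.isEmpty then []
  else
    let batch := PySem.List.slice seq none (some n)
    let rest := PySem.List.slice seq (some n) none
    let tl := if h : rest.length < seq.length then nconsAltLoop n yield_last_batch rest else []
    if ((batch.length : Int) = n) || yield_last_batch then batch :: tl else tl
termination_by seq.length

def n_consecutive_alt (items : List String) (n : Int) (yield_last_batch : Bool) : List (List String) :=
  nconsAltLoop n yield_last_batch items

-- ===== PRECONDITION & SPEC =====
-- Pre_ restricts to the natural domain of a chunk size, n ≥ 1: for n ≤ 0 A's buffer never
-- flushes (an accident of the accumulator) and B's slicing loop does not terminate.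
def Pre_n_consecutive (items : List String) (n : Int) (yield_last_batch : Bool) : Prop := 1 ≤ n
instance (items : List String) (n : Int) (yield_last_batch : Bool) : Decidable (Pre_n_consecutive items n yield_last_batch) := by unfold Pre_n_consecutive; infer_instance

def pvWitness_n_consecutive : List String × Int × Bool := (["A", "B", "C", "D", "E"], 2, true)

def Spec_n_consecutive (items : List String) (n : Int) (yield_last_batch : Bool) (out : List (List String)) : Prop := out = n_consecutive_alt items n yield_last_batch
instance (items : List String) (n : Int) (yield_last_batch : Bool) (out : List (List String)) : Decidable (Spec_n_consecutive items n yield_last_batch out) := by unfold Spec_n_consecutive; infer_instance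

-- ===== CLAIM (what is proved, stated in full; the proofs are below) =====
def Claim_equal_n_consecutive : Prop := ∀ (items : List String) (n : Int) (yield_last_batch : Bool), Dom_n_consecutive items n yield_last_batch → Pre_n_consecutive items n yield_last_batch → Spec_n_consecutive items n yield_last_batch (n_consecutive items n yield_last_batch)

-- ===== LEMMAS AND PROOFS =====

-- step below the flush threshold: just append
theorem nconsStep_lt (m : Nat) (acc : List (List String)) (vals : List String) (x : String)
    (h : vals.length + 1 < m) :
    nconsStep (m : Int) (acc, vals) x = (acc, vals ++ [x]) := by
  simp only [nconsStep]
  rw [if_neg]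
  simp only [List.length_append, List.length_cons, List.length_nil]
  intro hc
  have : vals.length + 1 = m := by exact_mod_cast hc
  omega

-- step at the flush threshold
theorem nconsStep_eq (m : Nat) (acc : List (List String)) (vals : List String) (x : String)
    (h : vals.length + 1 = m) :
    nconsStep (m : Int) (acc, vals) x = (acc ++ [vals ++ [x]], []) := by
  simp only [nconsStep]
  rw [if_pos]
  simp only [List.length_append, List.length_cons, List.length_nil]
  exact_mod_cast h

-- a short run never flushes
theorem foldl_small (m : Nat) :
    ∀ (xs : List String) (acc : List (List String)) (vals : List String),
      vals.length + xs.length < m →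
      List.foldl (nconsStep (m : Int)) (acc, vals) xs = (acc, vals ++ xs) := by
  intro xs
  induction xs with
  | nil => intro acc vals _; simp
  | cons x rest ih =>
    intro acc vals h
    simp only [List.length_cons] at h
    rw [List.foldl_cons, nconsStep_lt m acc vals x (by omega), ih _ _ (by simp; omega)]
    simp

-- a long enough run flushes exactly one chunk of the first m - vals.length items
theorem foldl_chunk (m : Nat) (hm : 1 ≤ m) :
    ∀ (xs : List String) (acc : List (List String)) (vals : List String),
      vals.length < m → m ≤ vals.length + xs.length →
      List.foldl (nconsStep (m : Int)) (acc, vals) xs =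
        List.foldl (nconsStep (m : Int))
          (acc ++ [vals ++ xs.take (m - vals.length)], []) (xs.drop (m - vals.length)) := by
  intro xs
  induction xs with
  | nil => intro acc vals h1 h2; simp at h2; omega
  | cons x rest ih =>
    intro acc vals h1 h2
    simp only [List.length_cons] at h2
    by_cases he : vals.length + 1 = m
    · rw [List.foldl_cons, nconsStep_eq m acc vals x he]
      have : m - vals.length = 1 := by omega
      simp [this]
    · rw [List.foldl_cons, nconsStep_lt m acc vals x (by omega)]
      rw [ih (acc) (vals ++ [x]) (by simp; omega) (by simp; omega)]
      have hk : m - vals.length = (m - (vals ++ [x]).length) + 1 := by simp; omega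
      rw [hk]
      simp [List.append_assoc]

-- the accumulated output is a prefix that the fold only appends to
theorem foldl_acc (m : Nat) :
    ∀ (xs : List String) (acc : List (List String)) (vals : List String),
      List.foldl (nconsStep (m : Int)) (acc, vals) xs =
        (acc ++ (List.foldl (nconsStep (m : Int)) ([], vals) xs).1,
         (List.foldl (nconsStep (m : Int)) ([], vals) xs).2) := by
  intro xs
  induction xs with
  | nil => intro acc vals; simp
  | cons x rest ih =>
    intro acc vals
    simp only [List.foldl_cons, nconsStep]
    split
    · simp only [List.nil_append]
      rw [ih (acc ++ [vals ++ [x]]) [], ih [vals ++ [x]] []]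
      simp
    · exact ih acc (vals ++ [x])

-- main loop equivalence, by well-founded recursion on xs.length
theorem loop_eq (m : Nat) (hm : 1 ≤ m) (ylb : Bool) (xs : List String) :
    n_consecutive xs (m : Int) ylb = nconsAltLoop (m : Int) ylb xs := by
  rcases Nat.lt_or_ge xs.length m with hlt | hge
  · -- short input: one (possibly dropped) final batch on both sides
    rw [nconsAltLoop]
    by_cases hx : xs = []
    · subst hx; simp [n_consecutive]
    · rw [if_neg (by simpa using hx)]
      have hb : PySem.List.slice xs none (some (m : Int)) = xs := by
        rw [PySem.List.slice_to_natCast]; exact List.take_of_length_le (by omega)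
      have hr : PySem.List.slice xs (some (m : Int)) none = [] := by
        rw [PySem.List.slice_from_natCast]; exact List.drop_of_length_le (by omega)
      simp only [hb, hr]
      rw [dif_pos (by simpa using List.length_pos_of_ne_nil hx), nconsAltLoop]
      have hcond : ¬ ((xs.length : Int) = (m : Int)) := by
        simp only [Int.natCast_inj]; omega
      simp only [n_consecutive, foldl_small m xs [] [] (by simpa using hlt)]
      cases ylb <;> simp [hcond, hx]
  · -- at least one full chunk: peel it off and recurse
    have hxpos : 0 < xs.length := by omega
    have hb : PySem.List.slice xs none (some (m : Int)) = xs.take m :=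
      PySem.List.slice_to_natCast xs m
    have hr : PySem.List.slice xs (some (m : Int)) none = xs.drop m :=
      PySem.List.slice_from_natCast xs m
    have hblen : (xs.take m).length = m := by simp; omega
    rw [nconsAltLoop, if_neg (by simp [List.isEmpty_iff]; intro h; subst h; simp at hxpos)]
    simp only [hb, hr]
    rw [dif_pos (by simp; omega)]
    rw [if_pos (by simp [hblen])]
    rw [← loop_eq m hm ylb (xs.drop m)]
    simp only [n_consecutive]
    rw [foldl_chunk m hm xs [] [] (by simpa using hm) (by simpa using hge)]
    simp only [List.length_nil, Nat.sub_zero, List.nil_append]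
    rw [foldl_acc m (xs.drop m) [xs.take m] []]
    cases hc : (List.foldl (nconsStep (m : Int)) ([], []) (xs.drop m)).2.isEmpty <;>
      cases ylb <;> simp [hc]
termination_by xs.length
decreasing_by simp only [List.length_drop]; omega

-- ===== VERDICT (by name: the statement is the Claim_ definition above) =====
theorem n_consecutive_spec : Claim_equal_n_consecutive := by
  intro items n ylb _ hpre
  have hp : 1 ≤ n := hpre
  unfold Spec_n_consecutive n_consecutive_alt
  have hn : n = ((n.toNat : Nat) : Int) := by omega
  rw [hn]
  have hm : 1 ≤ n.toNat := by omega
  exact loop_eq n.toNat hm ylb items
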